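-- pv_equiv track=rewrite | github.com/phgermanov/python_training | stock.py | get_profit2
-- ===== SOURCE A (Python) =====
-- def get_profit2(prices):
--     max_profit = 0
--     count = 0
--     for i in range(len(prices)):
--         for j in range(i+1, len(prices)):
--             start = min(i, j)
--             end   = max(i, j)
--
--             start_price = min(prices[i], prices[j])
--             end_price   = max(prices[i], prices[j])
--
--             profit = end_price - start_price
--
--             max_profit = max(max_profit, profit)
--             count += 1
--
--     print ('Loop:', count)
--     return max_profit
-- ===== SOURCE B (Python) =====
-- def get_profit2(prices):
--     # Same return value as A in one pass: the largest pairwise absolute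
--     # difference over an empty/singleton list is 0, otherwise max - min.
--     # (A also prints a loop counter; B performs no I/O.)
--     if not prices:
--         return 0
--     return max(prices) - min(prices)
-- ===== Notes on version B (the rewrite author's own statement) =====
-- stated objective: faster
-- what changed: Replaced the quadratic scan over all index pairs by the closed form max(prices)-min(prices) (0 for an empty list), since the largest pairwise difference is attained at the extrema.
import Mathlib
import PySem

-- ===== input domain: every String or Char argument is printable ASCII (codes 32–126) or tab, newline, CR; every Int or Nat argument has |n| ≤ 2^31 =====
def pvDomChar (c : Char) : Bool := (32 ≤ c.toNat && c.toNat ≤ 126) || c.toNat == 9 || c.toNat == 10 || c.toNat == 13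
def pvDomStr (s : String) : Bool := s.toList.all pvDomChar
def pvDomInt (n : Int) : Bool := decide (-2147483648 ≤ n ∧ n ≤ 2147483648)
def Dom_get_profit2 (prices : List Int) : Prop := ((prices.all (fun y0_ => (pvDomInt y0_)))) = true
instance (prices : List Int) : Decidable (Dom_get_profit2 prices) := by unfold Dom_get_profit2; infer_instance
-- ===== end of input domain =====

-- B replaces A's O(n^2) scan over all index pairs by max(prices)-min(prices) in one pass
-- (0 on empty input); equivalence is about the RETURN value only — A also prints a loop counter, B does not.

-- ===== PORT A =====
-- literal port of A's nested index loops; state is (max_profit, count); the unused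
-- 'start'/'end' index variables of A are dropped as dead code
def get_profit2 (prices : List Int) : Int :=
  let n : Int := (prices.length : Int)
  let st : Int × Int :=
    (PySem.List.pyRange 0 n 1).foldl (fun st i =>
      (PySem.List.pyRange (i + 1) n 1).foldl (fun st j =>
        let start_price := min (PySem.List.pyGetD prices i 0) (PySem.List.pyGetD prices j 0)
        let end_price   := max (PySem.List.pyGetD prices i 0) (PySem.List.pyGetD prices j 0)
        let profit := end_price - start_price
        (max st.1 profit, st.2 + 1)) st) ((0 : Int), (0 : Int))
  st.1

-- ===== PORT B =====
def get_profit2_alt (prices : List Int) : Int :=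
  match PySem.List.max? prices (fun x => x), PySem.List.min? prices (fun x => x) with
  | some M, some m => M - m
  | _, _ => 0

-- ===== PRECONDITION & SPEC =====
def Spec_get_profit2 (prices : List Int) (out : Int) : Prop := out = get_profit2_alt prices
instance (prices : List Int) (out : Int) : Decidable (Spec_get_profit2 prices out) := by unfold Spec_get_profit2; infer_instance

-- ===== CLAIM (what is proved, stated in full; the proofs are below) =====
def Claim_equal_get_profit2 : Prop := ∀ (prices : List Int), Dom_get_profit2 prices → Spec_get_profit2 prices (get_profit2 prices)

-- ===== LEMMAS AND PROOFS =====

-- fst of a fold whose first component ignores the second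
theorem pv_foldl_fst {α : Type} (F : Int × Int → α → Int × Int) (G : Int → α → Int)
    (h : ∀ st i, (F st i).1 = G st.1 i) :
    ∀ (l : List α) (st : Int × Int), (l.foldl F st).1 = l.foldl G st.1 := by
  intro l
  induction l with
  | nil => intro st; rfl
  | cons x t ih =>
      intro st
      simp only [List.foldl_cons, ih, h]

-- an inflationary fold only grows
theorem pv_le_foldl {α : Type} (F : Int → α → Int) (hmono : ∀ a x, a ≤ F a x) :
    ∀ (l : List α) (a : Int), a ≤ l.foldl F a := by
  intro l
  induction l with
  | nil => intro a; exact le_refl a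
  | cons x t ih => intro a; exact le_trans (hmono a x) (ih (F a x))

-- an inflationary fold dominates any value injected at a member
theorem pv_foldl_ge_of_mem {α : Type} (F : Int → α → Int) (hmono : ∀ a x, a ≤ F a x)
    (v : Int) (x : α) (hx : ∀ a, v ≤ F a x) :
    ∀ (l : List α) (a : Int), x ∈ l → v ≤ l.foldl F a := by
  intro l
  induction l with
  | nil => intro a h; cases h
  | cons y t ih =>
      intro a hmem
      rcases List.mem_cons.mp hmem with h | h
      · subst h
        exact le_trans (hx a) (pv_le_foldl F hmono t (F a x))
      · exact ih (F a y) h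

-- a fold whose steps preserve a bound stays bounded
theorem pv_foldl_le {α : Type} (F : Int → α → Int) (c : Int) :
    ∀ (l : List α) (a : Int), (∀ b x, x ∈ l → b ≤ c → F b x ≤ c) → a ≤ c → l.foldl F a ≤ c := by
  intro l
  induction l with
  | nil => intro a _ ha; exact ha
  | cons y t ih =>
      intro a hstep ha
      exact ih (F a y) (fun b x hx hb => hstep b x (List.mem_cons_of_mem y hx) hb)
        (hstep a y (List.mem_cons_self) ha)

-- the pairwise profit A computes for indices i, j
def pvD (prices : List Int) (i j : Int) : Int :=
  max (PySem.List.pyGetD prices i 0) (PySem.List.pyGetD prices j 0) -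
    min (PySem.List.pyGetD prices i 0) (PySem.List.pyGetD prices j 0)

-- A's return value equals the pure nested max-fold (count projected away)
theorem pv_A_eq_pure (prices : List Int) :
    get_profit2 prices =
      (PySem.List.pyRange 0 (prices.length : Int) 1).foldl (fun a i =>
        (PySem.List.pyRange (i + 1) (prices.length : Int) 1).foldl
          (fun a j => max a (pvD prices i j)) a) 0 := by
  unfold get_profit2
  rw [pv_foldl_fst _ (fun a i =>
        (PySem.List.pyRange (i + 1) (prices.length : Int) 1).foldl
          (fun a j => max a (pvD prices i j)) a)]
  intro st i
  rw [pv_foldl_fst _ (fun a j => max a (pvD prices i j))]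
  intro st' j
  rfl

theorem pv_main (prices : List Int) : get_profit2 prices = get_profit2_alt prices := by
  cases prices with
  | nil => decide
  | cons p ps =>
      have hmax := PySem.List.max?_id_cons p ps
      have hmin := PySem.List.min?_id_cons p ps
      set M := ps.foldl max p with hM
      set m := ps.foldl min p with hm
      have halt : get_profit2_alt (p :: ps) = M - m := by
        unfold get_profit2_alt
        rw [hmax, hmin]
      have hMmem : M ∈ p :: ps := PySem.List.max?_mem hmax
      have hmmem : m ∈ p :: ps := PySem.List.min?_mem hmin
      have hMmax : ∀ y ∈ p :: ps, y ≤ M := fun y hy => PySem.List.max?_isMax hmax y hy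
      have hmmin : ∀ y ∈ p :: ps, m ≤ y := fun y hy => PySem.List.min?_isMin hmin y hy
      have hmM : m ≤ M := hMmax m hmmem
      rw [pv_A_eq_pure, halt]
      set n : Int := ((p :: ps).length : Int) with hn
      have hget : ∀ (k : Nat) (hk : k < (p :: ps).length),
          PySem.List.pyGetD (p :: ps) (k : Int) 0 = (p :: ps)[k]'hk := by
        intro k hk
        rw [PySem.List.pyGetD_natCast]
        exact List.getD_eq_getElem _ _ hk
      -- upper bound
      have hub : (PySem.List.pyRange 0 n 1).foldl (fun a i =>
          (PySem.List.pyRange (i + 1) n 1).foldl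
            (fun a j => max a (pvD (p :: ps) i j)) a) 0 ≤ M - m := by
        apply pv_foldl_le _ (M - m) _ 0 _ (by omega)
        intro b i hi hb
        have hi' := (PySem.List.mem_pyRange_one).mp hi
        apply pv_foldl_le _ (M - m) _ b _ hb
        intro c j hj hc
        have hj' := (PySem.List.mem_pyRange_one).mp hj
        have hpi : PySem.List.pyGetD (p :: ps) i 0 ∈ (p :: ps) := by
          have e : i = ((i.toNat : Nat) : Int) := by omega
          rw [e, hget i.toNat (by omega)]
          exact List.getElem_mem _
        have hpj : PySem.List.pyGetD (p :: ps) j 0 ∈ (p :: ps) := by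
          have e : j = ((j.toNat : Nat) : Int) := by omega
          rw [e, hget j.toNat (by omega)]
          exact List.getElem_mem _
        have h1 := hMmax _ hpi
        have h2 := hMmax _ hpj
        have h3 := hmmin _ hpi
        have h4 := hmmin _ hpj
        simp only [max_le_iff, pvD]
        exact ⟨hc, by omega⟩
      -- lower bound
      obtain ⟨kM, hkM, hgM⟩ := List.mem_iff_getElem.mp hMmem
      obtain ⟨km, hkm, hgm⟩ := List.mem_iff_getElem.mp hmmem
      have hnonneg : (0 : Int) ≤ (PySem.List.pyRange 0 n 1).foldl (fun a i =>
          (PySem.List.pyRange (i + 1) n 1).foldl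
            (fun a j => max a (pvD (p :: ps) i j)) a) 0 :=
        pv_le_foldl _ (fun a i => pv_le_foldl _ (fun b j => le_max_left b _) _ a) _ 0
      have reach : ∀ (a b : Nat), a < b → b < (p :: ps).length →
          pvD (p :: ps) (a : Int) (b : Int) ≤ (PySem.List.pyRange 0 n 1).foldl (fun a i =>
            (PySem.List.pyRange (i + 1) n 1).foldl
              (fun a j => max a (pvD (p :: ps) i j)) a) 0 := by
        intro a b hab hb
        apply pv_foldl_ge_of_mem _
          (fun acc i => pv_le_foldl _ (fun c j => le_max_left c _) _ acc)
          _ ((a : Int))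
          (fun acc => by
            refine pv_foldl_ge_of_mem (fun c j => max c (pvD (p :: ps) (a : Int) j))
              (fun c j => le_max_left _ _) (pvD (p :: ps) (a : Int) (b : Int)) ((b : Int))
              (fun c => le_max_right _ _) _ acc ?_
            exact (PySem.List.mem_pyRange_one).mpr ⟨by omega, by omega⟩)
        exact (PySem.List.mem_pyRange_one).mpr ⟨by omega, by omega⟩
      have hlb : M - m ≤ (PySem.List.pyRange 0 n 1).foldl (fun a i =>
          (PySem.List.pyRange (i + 1) n 1).foldl
            (fun a j => max a (pvD (p :: ps) i j)) a) 0 := by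
        rcases lt_trichotomy kM km with h | h | h
        · have hr := reach kM km h hkm
          have hv : pvD (p :: ps) (kM : Int) (km : Int) = M - m := by
            unfold pvD
            rw [hget kM hkM, hget km hkm, hgM, hgm, max_eq_left hmM, min_eq_right hmM]
          omega
        · subst h
          have hMm : M = m := by rw [← hgM, ← hgm]
          omega
        · have hr := reach km kM h hkM
          have hv : pvD (p :: ps) (km : Int) (kM : Int) = M - m := by
            unfold pvD
            rw [hget km hkm, hget kM hkM, hgM, hgm, max_eq_right hmM, min_eq_left hmM]
          omega
      omega

-- ===== VERDICT (by name: the statement is the Claim_ definition above) =====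
theorem get_profit2_spec : Claim_equal_get_profit2 := by
  intro prices _
  exact pv_main prices
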